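-- pv_equiv track=rewrite | github.com/knaticat/Bioinformatic-Algorithms | maxnonbranch.py | find_degree
-- ===== SOURCE A (Python) =====
-- def find_degree(graph):
--     deg = {}
--     outdeg = {}
--     value = graph.values()
--     key = graph.keys()
--     for k in key:
--         deg[k] = len(graph[k])
--         outdeg[k] = len(graph[k])
--     for v in value:
--         for i in range(len(v)):
--             if v[i] not in deg:
--                 deg[v[i]] = 1
--                 outdeg[v[i]] = 0
--             else:
--                 deg[v[i]]+=1
--     indeg = {key: deg[key] - outdeg.get(key, 0) for key in deg}
--
--     return deg,indeg,outdeg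
-- ===== SOURCE B (Python) =====
-- def find_degree(graph):
--     targets = [t for adj in graph.values() for t in adj]
--     counts = {}
--     for t in targets:
--         counts[t] = counts.get(t, 0) + 1
--     vertices = list(graph) + [t for t in dict.fromkeys(targets) if t not in graph]
--     outdeg = {v: len(graph.get(v, ())) for v in vertices}
--     indeg = {v: counts.get(v, 0) for v in vertices}
--     deg = {v: outdeg[v] + indeg[v] for v in vertices}
--     return deg, indeg, outdeg
-- ===== Notes on version B (the rewrite author's own statement) =====
-- stated objective: alternative
-- what changed: B flattens all adjacency lists once and counts in-degrees in a single dict pass, builds the vertex order explicitly (keys then first-seen targets), and derives deg as outdeg+indeg by comprehensions, inverting A's total-minus-out derivation with its nested index loop and branching updates.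
import Mathlib
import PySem

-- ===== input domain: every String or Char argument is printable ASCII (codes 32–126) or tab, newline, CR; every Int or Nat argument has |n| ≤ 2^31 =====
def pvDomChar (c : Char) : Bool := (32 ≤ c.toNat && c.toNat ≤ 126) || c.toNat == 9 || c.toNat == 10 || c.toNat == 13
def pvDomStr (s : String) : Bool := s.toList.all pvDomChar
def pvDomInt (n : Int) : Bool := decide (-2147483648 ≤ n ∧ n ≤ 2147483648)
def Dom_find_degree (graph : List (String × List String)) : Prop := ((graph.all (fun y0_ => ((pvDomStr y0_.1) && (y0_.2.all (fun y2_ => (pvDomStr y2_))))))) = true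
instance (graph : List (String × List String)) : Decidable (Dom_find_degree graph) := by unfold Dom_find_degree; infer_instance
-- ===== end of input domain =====

-- B builds the vertex order explicitly (keys, then first-seen targets), counts in-degrees in one
-- pass over the flattened adjacency lists, and derives deg = outdeg + indeg, inverting A's
-- total-minus-out derivation with its nested index loop and branching updates (objective: alternative).

-- ===== PORT A =====
-- loop body of A's second loop, applied to the element x = v[i]
def pvA_step (p : PySem.Dict String Int × PySem.Dict String Int) (x : String) :
    PySem.Dict String Int × PySem.Dict String Int :=
  if p.1.contains x = false then (p.1.insert x 1, p.2.insert x 0)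
  else (p.1.modify x 0 (· + 1), p.2)

def find_degree (graph : List (String × List String)) :
    (List (String × Int)) × (List (String × Int)) × (List (String × Int)) :=
  let g := PySem.Dict.ofList graph
  -- for k in key: deg[k] = len(graph[k]); outdeg[k] = len(graph[k])   (k is a key of g, so graph[k] = g.getD k [] is exact)
  let p1 := g.keys.foldl (fun p k =>
      (p.1.insert k (PySem.List.len (g.getD k [])),
       p.2.insert k (PySem.List.len (g.getD k [])))) (PySem.Dict.empty, PySem.Dict.empty)
  -- for v in value: for i in range(len(v)): …
  let p2 := g.values.foldl (fun p v =>
      (PySem.List.pyRange 0 (PySem.List.len v) 1).foldl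
        (fun q i => pvA_step q (PySem.List.pyGetD v i "")) p) p1
  -- indeg = {key: deg[key] - outdeg.get(key, 0) for key in deg}
  let indeg := p2.1.keys.foldl (fun d k => d.insert k (p2.1.getD k 0 - p2.2.getD k 0)) PySem.Dict.empty
  (p2.1.items, indeg.items, p2.2.items)

-- ===== PORT B =====
def find_degree_alt (graph : List (String × List String)) :
    (List (String × Int)) × (List (String × Int)) × (List (String × Int)) :=
  let g := PySem.Dict.ofList graph
  -- targets = [t for adj in graph.values() for t in adj]
  let targets := g.values.flatten
  -- counts = {}; for t in targets: counts[t] = counts.get(t, 0) + 1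
  let counts := targets.foldl (fun c t => c.insert t (c.getD t 0 + 1)) (PySem.Dict.empty : PySem.Dict String Int)
  -- vertices = list(graph) + [t for t in dict.fromkeys(targets) if t not in graph]
  let vertices := g.keys ++ (PySem.List.dedup targets).filter (fun t => !(g.contains t))
  -- three dict comprehensions over vertices
  let outdeg := vertices.foldl (fun d v => d.insert v (PySem.List.len (g.getD v []))) PySem.Dict.empty
  let indeg := vertices.foldl (fun d v => d.insert v (counts.getD v 0)) PySem.Dict.empty
  let deg := vertices.foldl (fun d v => d.insert v (outdeg.getD v 0 + indeg.getD v 0)) PySem.Dict.empty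
  (deg.items, indeg.items, outdeg.items)

-- ===== PRECONDITION & SPEC =====
def Spec_find_degree (graph : List (String × List String)) (out : (List (String × Int)) × (List (String × Int)) × (List (String × Int))) : Prop := out = find_degree_alt graph
instance (graph : List (String × List String)) (out : (List (String × Int)) × (List (String × Int)) × (List (String × Int))) : Decidable (Spec_find_degree graph out) := by unfold Spec_find_degree; infer_instance

-- ===== CLAIM (what is proved, stated in full; the proofs are below) =====
def Claim_equal_find_degree : Prop := ∀ (graph : List (String × List String)), Dom_find_degree graph → Spec_find_degree graph (find_degree graph)

-- ===== LEMMAS AND PROOFS =====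

-- proof-side names for the subterms of the two ports
def pvP2 (g : PySem.Dict String (List String)) : PySem.Dict String Int × PySem.Dict String Int :=
  g.values.foldl (fun p v =>
      (PySem.List.pyRange 0 (PySem.List.len v) 1).foldl
        (fun q i => pvA_step q (PySem.List.pyGetD v i "")) p)
    (g.keys.foldl (fun p k =>
      (p.1.insert k (PySem.List.len (g.getD k [])),
       p.2.insert k (PySem.List.len (g.getD k [])))) (PySem.Dict.empty, PySem.Dict.empty))

def pvD1 (g : PySem.Dict String (List String)) : PySem.Dict String Int :=
  g.keys.foldl (fun d k => d.insert k (PySem.List.len (g.getD k []))) PySem.Dict.empty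

def pvTs (g : PySem.Dict String (List String)) : List String := g.values.flatten
def pvV (g : PySem.Dict String (List String)) : List String := PySem.Set.update g.keys (pvTs g)
def pvCounts (g : PySem.Dict String (List String)) : PySem.Dict String Int :=
  (pvTs g).foldl (fun c t => c.insert t (c.getD t 0 + 1)) PySem.Dict.empty
def pvVertsB (g : PySem.Dict String (List String)) : List String :=
  g.keys ++ (PySem.List.dedup (pvTs g)).filter (fun t => !(g.contains t))
def pvOutB (g : PySem.Dict String (List String)) : PySem.Dict String Int :=
  (pvVertsB g).foldl (fun d v => d.insert v (PySem.List.len (g.getD v []))) PySem.Dict.empty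
def pvIndB (g : PySem.Dict String (List String)) : PySem.Dict String Int :=
  (pvVertsB g).foldl (fun d v => d.insert v ((pvCounts g).getD v 0)) PySem.Dict.empty
def pvDegB (g : PySem.Dict String (List String)) : PySem.Dict String Int :=
  (pvVertsB g).foldl (fun d v => d.insert v ((pvOutB g).getD v 0 + (pvIndB g).getD v 0)) PySem.Dict.empty

theorem find_degree_eq (graph : List (String × List String)) :
    find_degree graph =
      ((pvP2 (PySem.Dict.ofList graph)).1.items,
       ((pvP2 (PySem.Dict.ofList graph)).1.keys.foldl
          (fun d k => d.insert k ((pvP2 (PySem.Dict.ofList graph)).1.getD k 0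
            - (pvP2 (PySem.Dict.ofList graph)).2.getD k 0)) PySem.Dict.empty).items,
       (pvP2 (PySem.Dict.ofList graph)).2.items) := rfl

theorem find_degree_alt_eq (graph : List (String × List String)) :
    find_degree_alt graph =
      ((pvDegB (PySem.Dict.ofList graph)).items,
       (pvIndB (PySem.Dict.ofList graph)).items,
       (pvOutB (PySem.Dict.ofList graph)).items) := rfl

-- A's second loop, split into its two independent components
theorem pv_pairloop (l : List String) (d o : PySem.Dict String Int) (h : d.keys = o.keys) :
    l.foldl pvA_step (d, o)
      = (l.foldl (fun d x => d.modify x 0 (· + 1)) d,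
         l.foldl (fun o x => o.setdefault x 0) o) := by
  induction l generalizing d o with
  | nil => rfl
  | cons x l ih =>
    have hco : d.contains x = o.contains x := by
      rw [PySem.Dict.contains_eq_decide_mem_keys, PySem.Dict.contains_eq_decide_mem_keys, h]
    by_cases hc : d.contains x = false
    · have hoc : o.contains x = false := by rw [← hco]; exact hc
      have h1 : pvA_step (d, o) x = (d.insert x 1, o.insert x 0) := by
        simp [pvA_step, hc]
      have h2 : d.modify x 0 (· + 1) = d.insert x 1 := by
        simp [PySem.Dict.modify, PySem.Dict.getD_of_not_contains d 0 hc]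
      have h3 : o.setdefault x 0 = o.insert x 0 :=
        PySem.Dict.setdefault_of_not_contains o 0 hoc
      simp only [List.foldl_cons, h1, h2, h3]
      exact ih _ _ (by
        rw [PySem.Dict.keys_insert_of_not_contains d 1 hc,
            PySem.Dict.keys_insert_of_not_contains o 0 hoc, h])
    · have hc' : d.contains x = true := by simpa using hc
      have hoc : o.contains x = true := by rw [← hco]; exact hc'
      have h1 : pvA_step (d, o) x = (d.modify x 0 (· + 1), o) := by
        simp [pvA_step, hc']
      have h3 : o.setdefault x 0 = o := PySem.Dict.setdefault_of_contains o 0 hoc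
      simp only [List.foldl_cons, h1, h3]
      exact ih _ _ (by
        rw [PySem.Dict.keys_modify, PySem.Dict.keys_insert_of_contains _ _ hc', h])

-- value of a setdefault-fold
theorem pv_getD_foldl_setdefault (l : List String) (o : PySem.Dict String Int) (v : String) :
    (l.foldl (fun o x => o.setdefault x 0) o).getD v 0
      = if o.contains v = true then o.getD v 0 else 0 := by
  induction l generalizing o with
  | nil =>
    by_cases hc : o.contains v = true
    · simp [hc]
    · simp [hc, PySem.Dict.getD_of_not_contains o 0 (by simpa using hc)]
  | cons x l ih =>
    rw [List.foldl_cons, ih]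
    by_cases hvx : v = x
    · subst hvx
      simp only [PySem.Dict.contains_setdefault, BEq.rfl, Bool.true_or,
        PySem.Dict.getD_setdefault_self, if_true]
      by_cases hc : o.contains v = true
      · simp [hc]
      · simp [hc, PySem.Dict.getD_of_not_contains o 0 (by simpa using hc)]
    · simp [PySem.Dict.contains_setdefault, hvx,
            PySem.Dict.getD, PySem.Dict.get?_setdefault_of_ne o 0 hvx]

-- keys of a setdefault-fold
theorem pv_keys_foldl_setdefault (l : List String) (o : PySem.Dict String Int) :
    (l.foldl (fun o x => o.setdefault x 0) o).keys = PySem.Set.update o.keys l := by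
  induction l generalizing o with
  | nil => rfl
  | cons x l ih =>
    rw [List.foldl_cons, ih, PySem.Set.update_cons]
    congr 1
    rw [PySem.Dict.keys_setdefault]
    by_cases hc : o.contains x = true
    · have hm : x ∈ o.keys := (PySem.Dict.contains_iff_mem_keys o x).mp hc
      simp [PySem.Set.add, hm, hc]
    · have hc' : o.contains x = false := by simpa using hc
      have hm : x ∉ o.keys := fun m => by
        simp [(PySem.Dict.contains_iff_mem_keys o x).mpr m] at hc'
      simp [PySem.Set.add, hm, hc']

-- A's first loop builds (pvD1 g, pvD1 g); the second decomposes into modify/setdefault folds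
theorem pvP2_eq (g : PySem.Dict String (List String)) :
    pvP2 g = ((pvTs g).foldl (fun d x => d.modify x 0 (· + 1)) (pvD1 g),
              (pvTs g).foldl (fun o x => o.setdefault x 0) (pvD1 g)) := by
  have hsplit : List.foldl (fun (p : PySem.Dict String Int × PySem.Dict String Int) k =>
      (p.1.insert k (PySem.List.len (g.getD k [])), p.2.insert k (PySem.List.len (g.getD k []))))
      (PySem.Dict.empty, PySem.Dict.empty) g.keys = (pvD1 g, pvD1 g) :=
    PySem.List.foldl_prod_mk (fun d k => d.insert k (PySem.List.len (g.getD k [])))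
      (fun d k => d.insert k (PySem.List.len (g.getD k []))) g.keys PySem.Dict.empty PySem.Dict.empty
  unfold pvP2
  rw [hsplit]
  simp only [PySem.List.foldl_pyRange_zero_pyGetD]
  rw [← List.foldl_flatten]
  exact pv_pairloop _ _ _ rfl

theorem pvD1_items (g : PySem.Dict String (List String)) (hnd : g.keys.Nodup) :
    (pvD1 g).items = g.keys.map (fun k => (k, PySem.List.len (g.getD k []))) := by
  have := PySem.Dict.items_foldl_insert_fresh g.keys (fun a => a)
    (fun k => PySem.List.len (g.getD k [])) PySem.Dict.empty
    (fun a _ => by simp [PySem.Dict.contains_empty]) (by simpa using hnd)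
  simpa [pvD1] using this

theorem pvD1_keys (g : PySem.Dict String (List String)) (hnd : g.keys.Nodup) :
    (pvD1 g).keys = g.keys := by
  rw [PySem.Dict.keys, pvD1_items g hnd, List.map_map]
  simp [Function.comp_def]

theorem pvD1_getD (g : PySem.Dict String (List String)) (hnd : g.keys.Nodup) (v : String) :
    (pvD1 g).getD v 0 = PySem.List.len (g.getD v []) := by
  by_cases hm : v ∈ g.keys
  · exact PySem.Dict.getD_of_mem_items (pvD1 g)
      (by rw [pvD1_items g hnd]; exact List.mem_map_of_mem hm)
      (by rw [pvD1_keys g hnd]; exact hnd) 0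
  · have h1 : (pvD1 g).contains v = false := by
      rw [PySem.Dict.contains_eq_decide_mem_keys, pvD1_keys g hnd]
      simpa using hm
    have h2 : g.contains v = false := by
      rw [PySem.Dict.contains_eq_decide_mem_keys]; simpa using hm
    rw [PySem.Dict.getD_of_not_contains _ 0 h1,
        PySem.Dict.getD_of_not_contains _ [] h2]
    simp [PySem.List.len]

theorem pvV_nodup (g : PySem.Dict String (List String)) (hnd : g.keys.Nodup) :
    (pvV g).Nodup := PySem.Set.nodup_update _ _ hnd

theorem pvP2_fst_getD (g : PySem.Dict String (List String)) (hnd : g.keys.Nodup) (v : String) :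
    (pvP2 g).1.getD v 0 = PySem.List.len (g.getD v []) + ((pvTs g).count v : Int) := by
  rw [pvP2_eq]
  simpa [pvD1_getD g hnd v] using PySem.Dict.getD_foldl_modify_add_one (pvTs g) (pvD1 g) v

theorem pvP2_snd_getD (g : PySem.Dict String (List String)) (hnd : g.keys.Nodup) (v : String) :
    (pvP2 g).2.getD v 0 = PySem.List.len (g.getD v []) := by
  rw [pvP2_eq]
  rw [pv_getD_foldl_setdefault (pvTs g) (pvD1 g) v]
  by_cases hm : v ∈ g.keys
  · have hc : (pvD1 g).contains v = true := by
      rw [PySem.Dict.contains_eq_decide_mem_keys, pvD1_keys g hnd]; simpa using hm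
    rw [if_pos hc, pvD1_getD g hnd v]
  · have hc : (pvD1 g).contains v = false := by
      rw [PySem.Dict.contains_eq_decide_mem_keys, pvD1_keys g hnd]; simpa using hm
    have h2 : g.contains v = false := by
      rw [PySem.Dict.contains_eq_decide_mem_keys]; simpa using hm
    rw [if_neg (by simp [hc]), PySem.Dict.getD_of_not_contains _ [] h2]
    simp [PySem.List.len]

theorem pvP2_fst_keys (g : PySem.Dict String (List String)) (hnd : g.keys.Nodup) :
    (pvP2 g).1.keys = pvV g := by
  rw [pvP2_eq]
  have hk : (List.foldl (fun (d : PySem.Dict String Int) x => d.modify x 0 (· + 1)) (pvD1 g) (pvTs g)).keys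
      = PySem.Set.update (pvD1 g).keys (pvTs g) :=
    PySem.Dict.keys_foldl_modify (pvTs g) 0 (fun _ _ => (· + 1)) (pvD1 g)
  rw [hk, pvD1_keys g hnd]
  rfl

theorem pvP2_snd_keys (g : PySem.Dict String (List String)) (hnd : g.keys.Nodup) :
    (pvP2 g).2.keys = pvV g := by
  rw [pvP2_eq, pv_keys_foldl_setdefault (pvTs g) (pvD1 g), pvD1_keys g hnd]
  rfl

theorem pvP2_fst_items (g : PySem.Dict String (List String)) (hnd : g.keys.Nodup) :
    (pvP2 g).1.items
      = (pvV g).map (fun v => (v, PySem.List.len (g.getD v []) + ((pvTs g).count v : Int))) := by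
  rw [PySem.Dict.items_eq_map_keys (pvP2 g).1 (by rw [pvP2_fst_keys g hnd]; exact pvV_nodup g hnd) 0,
      pvP2_fst_keys g hnd]
  exact List.map_congr_left (fun v _ => by rw [pvP2_fst_getD g hnd v])

theorem pvP2_snd_items (g : PySem.Dict String (List String)) (hnd : g.keys.Nodup) :
    (pvP2 g).2.items = (pvV g).map (fun v => (v, PySem.List.len (g.getD v []))) := by
  rw [PySem.Dict.items_eq_map_keys (pvP2 g).2 (by rw [pvP2_snd_keys g hnd]; exact pvV_nodup g hnd) 0,
      pvP2_snd_keys g hnd]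
  exact List.map_congr_left (fun v _ => by rw [pvP2_snd_getD g hnd v])

-- generic: items of a fresh insert-comprehension over pvV g
theorem pv_comprehension_items (g : PySem.Dict String (List String)) (hnd : g.keys.Nodup)
    (f : String → Int) :
    ((pvV g).foldl (fun d v => d.insert v (f v)) PySem.Dict.empty).items
      = (pvV g).map (fun v => (v, f v)) := by
  have := PySem.Dict.items_foldl_insert_fresh (pvV g) (fun a => a) f PySem.Dict.empty
    (fun a _ => by simp [PySem.Dict.contains_empty]) (by simpa using pvV_nodup g hnd)
  simpa using this

-- B's vertex list is the same ordered union of keys and targets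
theorem pv_verts_eq (g : PySem.Dict String (List String)) : pvVertsB g = pvV g := by
  unfold pvVertsB
  rw [PySem.List.dedup_eq_ofList]
  have hfun : (fun t => !(g.contains t)) = (fun y => !(PySem.Set.contains g.keys y)) := by
    funext t
    rw [PySem.Dict.contains_eq_decide_mem_keys]
    simp [PySem.Set.contains]
  rw [hfun, ← PySem.Set.update_eq_append_filter g.keys (pvTs g)]
  rfl

theorem pvCounts_getD (g : PySem.Dict String (List String)) (v : String) :
    (pvCounts g).getD v 0 = ((pvTs g).count v : Int) := by
  simpa using PySem.Dict.getD_foldl_insert_add_one (pvTs g) PySem.Dict.empty v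

theorem pvOutB_items (g : PySem.Dict String (List String)) (hnd : g.keys.Nodup) :
    (pvOutB g).items = (pvV g).map (fun v => (v, PySem.List.len (g.getD v []))) := by
  unfold pvOutB
  rw [pv_verts_eq g]
  exact pv_comprehension_items g hnd _

theorem pvIndB_items (g : PySem.Dict String (List String)) (hnd : g.keys.Nodup) :
    (pvIndB g).items = (pvV g).map (fun v => (v, ((pvTs g).count v : Int))) := by
  unfold pvIndB
  rw [pv_verts_eq g, pv_comprehension_items g hnd _]
  exact List.map_congr_left (fun v _ => by rw [pvCounts_getD g v])

theorem pvOutB_nodup (g : PySem.Dict String (List String)) (hnd : g.keys.Nodup) :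
    (pvOutB g).keys.Nodup := by
  rw [PySem.Dict.keys, pvOutB_items g hnd, List.map_map]
  simpa [Function.comp_def] using pvV_nodup g hnd

theorem pvIndB_nodup (g : PySem.Dict String (List String)) (hnd : g.keys.Nodup) :
    (pvIndB g).keys.Nodup := by
  rw [PySem.Dict.keys, pvIndB_items g hnd, List.map_map]
  simpa [Function.comp_def] using pvV_nodup g hnd

theorem pvDegB_items (g : PySem.Dict String (List String)) (hnd : g.keys.Nodup) :
    (pvDegB g).items
      = (pvV g).map (fun v => (v, PySem.List.len (g.getD v []) + ((pvTs g).count v : Int))) := by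
  unfold pvDegB
  rw [pv_verts_eq g, pv_comprehension_items g hnd _]
  refine List.map_congr_left (fun v hv => ?_)
  have h1 : (pvOutB g).getD v 0 = PySem.List.len (g.getD v []) :=
    PySem.Dict.getD_of_mem_items (pvOutB g)
      (by rw [pvOutB_items g hnd]; exact List.mem_map_of_mem hv) (pvOutB_nodup g hnd) 0
  have h2 : (pvIndB g).getD v 0 = ((pvTs g).count v : Int) :=
    PySem.Dict.getD_of_mem_items (pvIndB g)
      (by rw [pvIndB_items g hnd]; exact List.mem_map_of_mem hv) (pvIndB_nodup g hnd) 0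
  rw [h1, h2]

theorem pvIndegA_items (g : PySem.Dict String (List String)) (hnd : g.keys.Nodup) :
    ((pvP2 g).1.keys.foldl
        (fun d k => d.insert k ((pvP2 g).1.getD k 0 - (pvP2 g).2.getD k 0)) PySem.Dict.empty).items
      = (pvV g).map (fun v => (v, ((pvTs g).count v : Int))) := by
  rw [pvP2_fst_keys g hnd, pv_comprehension_items g hnd _]
  refine List.map_congr_left (fun v _ => ?_)
  rw [pvP2_fst_getD g hnd v, pvP2_snd_getD g hnd v]
  congr 1
  ring

theorem pv_main (graph : List (String × List String)) :
    find_degree graph = find_degree_alt graph := by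
  have hnd : (PySem.Dict.ofList graph).keys.Nodup := PySem.Dict.nodup_keys_ofList graph
  rw [find_degree_eq, find_degree_alt_eq,
      pvP2_fst_items _ hnd, pvP2_snd_items _ hnd, pvIndegA_items _ hnd,
      pvDegB_items _ hnd, pvIndB_items _ hnd, pvOutB_items _ hnd]

-- ===== VERDICT (by name: the statement is the Claim_ definition above) =====
theorem find_degree_spec : Claim_equal_find_degree := by
  intro graph _
  exact pv_main graph
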